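-- pv_equiv track=rewrite | github.com/HDAlbarenque/Setup1 | utils/xls_import_crm.py | _parse_numero_act
-- ===== SOURCE A (Python) =====
-- from typing import Optional
--
-- def _parse_numero_act(value) -> Optional[int]:
--     """Extrae el último segmento numérico del campo 'Número' y lo convierte a entero.
--
--     Formato esperado: 'dddd-xxx.xxx' donde dddd son 4 dígitos y xxx.xxx son 6 dígitos con punto de miles.
--     Se extrae el segmento derecho, se eliminan separadores y se convierte a int.
--     """
--     if value is None:
--         return None
--     s = str(value).strip()
--     if s == "":
--         return None
--     # Tomar el segmento a la derecha del guión si existe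
--     if "-" in s:
--         right = s.split("-")[-1].strip()
--     else:
--         right = s
--     # Mantener solo dígitos
--     digits_only = "".join(ch for ch in right if ch.isdigit())
--     if digits_only == "":
--         return None
--     try:
--         return int(digits_only)
--     except Exception:
--         return None
-- ===== SOURCE B (Python) =====
-- from typing import Optional
--
--
-- def _parse_numero_act(value) -> Optional[int]:
--     """Single right-to-left scan: collect the digits of the rightmost segment,
--     stopping at the first '-' seen from the right."""
--     if value is None:
--         return None
--     s = str(value).strip()
--     if s == "":
--         return None
--     digits = []
--     for ch in reversed(s):
--         if ch == '-':
--             break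
--         if ch.isdigit():
--             digits = [ch] + digits
--     if not digits:
--         return None
--     return int("".join(digits))
-- ===== Notes on version B (the rewrite author's own statement) =====
-- stated objective: alternative
-- what changed: Replaces A's split-on-dash + join-filter two-pass pipeline by a single right-to-left scan that accumulates digit characters and stops at the first dash from the right.
import Mathlib
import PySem

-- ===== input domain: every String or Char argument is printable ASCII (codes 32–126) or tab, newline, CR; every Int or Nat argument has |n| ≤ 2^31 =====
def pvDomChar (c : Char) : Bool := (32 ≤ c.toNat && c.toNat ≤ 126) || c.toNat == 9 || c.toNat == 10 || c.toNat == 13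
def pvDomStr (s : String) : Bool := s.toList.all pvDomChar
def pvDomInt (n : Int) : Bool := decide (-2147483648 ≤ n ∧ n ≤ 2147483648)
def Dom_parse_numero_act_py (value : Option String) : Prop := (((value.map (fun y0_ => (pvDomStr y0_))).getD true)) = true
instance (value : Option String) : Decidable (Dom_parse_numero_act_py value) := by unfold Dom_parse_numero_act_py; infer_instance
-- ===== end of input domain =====

-- B replaces A's split-on-dash + filter two-pass pipeline by one right-to-left scan with an accumulator (same cost, different decomposition).

-- ===== PORT A =====
def parse_numero_act_py (value : Option String) : Option Int :=
  match value with
  | none => none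
  | some v =>
    let s := PySem.Chars.strip v.toList
    if s = [] then none
    else
      let right :=
        if PySem.Chars.isIn ['-'] s then
          -- s.split("-")[-1]: split always returns a nonempty list, so [-1] is its last element
          PySem.Chars.strip ((PySem.Chars.splitOn s ['-']).getLastD [])
        else s
      let digits_only := right.filter PySem.Chars.isdigit
      if digits_only = [] then none
      else PySem.Int.ofChars? digits_only  -- try int(...) / except: ofChars? is none exactly where int() raises

-- ===== PORT B =====
-- the right-to-left loop of Source B: input is s reversed, digits are prepended to acc, stop at '-'
def pvScanB : List Char → List Char → List Char
  | [], acc => acc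
  | c :: rest, acc =>
    if c = '-' then acc
    else pvScanB rest (if PySem.Chars.isdigit c then c :: acc else acc)

def parse_numero_act_py_alt (value : Option String) : Option Int :=
  match value with
  | none => none
  | some v =>
    let s := PySem.Chars.strip v.toList
    if s = [] then none
    else
      let ds := pvScanB s.reverse []
      if ds = [] then none
      else PySem.Int.ofChars? ds

-- ===== PRECONDITION & SPEC =====
def Spec_parse_numero_act_py (value : Option String) (out : Option Int) : Prop := out = parse_numero_act_py_alt value
instance (value : Option String) (out : Option Int) : Decidable (Spec_parse_numero_act_py value out) := by unfold Spec_parse_numero_act_py; infer_instance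

-- ===== CLAIM (what is proved, stated in full; the proofs are below) =====
def Claim_equal_parse_numero_act_py : Prop := ∀ (value : Option String), Dom_parse_numero_act_py value → Spec_parse_numero_act_py value (parse_numero_act_py value)

-- ===== LEMMAS AND PROOFS =====

-- proof-side spec: the segment of l to the right of its last '-' (cur = segment collected so far)
def pvTailSeg (cur : List Char) : List Char → List Char
  | [] => cur
  | c :: rest => if c = '-' then pvTailSeg [] rest else pvTailSeg (cur ++ [c]) rest

theorem pvGo_cons (fuel : Nat) (c : Char) (rest cur : List Char) (acc : List (List Char)) :
    PySem.Chars.splitOn.go ['-'] (fuel+1) (c :: rest) cur acc =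
      if c = '-' then PySem.Chars.splitOn.go ['-'] fuel rest [] (cur.reverse :: acc)
      else PySem.Chars.splitOn.go ['-'] fuel rest (c :: cur) acc := by
  by_cases h : c = '-'
  · simp [PySem.Chars.splitOn.go, List.isPrefixOf, h]
  · simp [PySem.Chars.splitOn.go, List.isPrefixOf, h]
    exact fun hc => (h hc.symm).elim

theorem pvGo_last (l : List Char) (fuel : Nat) (cur : List Char) (acc : List (List Char))
    (d : List Char) (h : l.length ≤ fuel) :
    (PySem.Chars.splitOn.go ['-'] fuel l cur acc).getLastD d = pvTailSeg cur.reverse l := by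
  induction l generalizing fuel cur acc with
  | nil =>
    cases fuel <;> simp [PySem.Chars.splitOn.go, pvTailSeg]
  | cons c rest ih =>
    cases fuel with
    | zero => simp at h
    | succ f =>
      rw [pvGo_cons]
      by_cases hc : c = '-'
      · simp only [hc, pvTailSeg, if_pos]
        have := ih f [] (cur.reverse :: acc) (by simpa using h)
        simpa using this
      · simp only [pvTailSeg, if_neg hc]
        have := ih f (c :: cur) acc (by simpa using h)
        simpa using this

theorem pvSplitOn_last (s : List Char) :
    (PySem.Chars.splitOn s ['-']).getLastD [] = pvTailSeg [] s := by
  have := pvGo_last s (s.length + 1) [] [] [] (by omega)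
  simpa [PySem.Chars.splitOn] using this

theorem pvTailSeg_concat (xs : List Char) (c : Char) (cur : List Char) :
    pvTailSeg cur (xs ++ [c]) = if c = '-' then [] else pvTailSeg cur xs ++ [c] := by
  induction xs generalizing cur with
  | nil => by_cases hc : c = '-' <;> simp [pvTailSeg, hc]
  | cons x rest ih => by_cases hx : x = '-' <;> simp [pvTailSeg, hx, ih]

theorem pvTailSeg_no_dash (l cur : List Char) (h : '-' ∉ l) : pvTailSeg cur l = cur ++ l := by
  induction l generalizing cur with
  | nil => simp [pvTailSeg]
  | cons c rest ih =>
    have hc : c ≠ '-' := fun hc => h (hc ▸ List.mem_cons_self)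
    simp [pvTailSeg, hc, ih (cur ++ [c]) (fun hm => h (List.mem_cons_of_mem _ hm))]

theorem pvSpace_not_digit (c : Char) (hc : PySem.Chars.isspace c = true) :
    PySem.Chars.isdigit c = false := by
  simp only [PySem.Chars.isspace, Bool.or_eq_true, Bool.and_eq_true, decide_eq_true_eq] at hc
  rw [Bool.eq_false_iff]
  intro h
  simp only [PySem.Chars.isdigit, Bool.and_eq_true, decide_eq_true_eq, Char.le_def,
    UInt32.le_iff_toNat_le] at h
  have h48 : ('0').val.toNat = 48 := by decide
  have h57 : ('9').val.toNat = 57 := by decide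
  rw [h48, h57] at h
  have : c.toNat = c.val.toNat := rfl
  omega

theorem pvFilter_dropWhile (x : List Char) :
    (x.dropWhile PySem.Chars.isspace).filter PySem.Chars.isdigit = x.filter PySem.Chars.isdigit := by
  induction x with
  | nil => rfl
  | cons c rest ih =>
    by_cases hc : PySem.Chars.isspace c
    · simp [hc, ih, pvSpace_not_digit c hc]
    · simp [hc]

theorem pvFilter_strip (x : List Char) :
    (PySem.Chars.strip x).filter PySem.Chars.isdigit = x.filter PySem.Chars.isdigit := by
  simp [PySem.Chars.strip, PySem.Chars.lstrip, PySem.Chars.rstrip, List.filter_reverse,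
    pvFilter_dropWhile]

theorem pvScanB_eq (l : List Char) (acc : List Char) :
    pvScanB l.reverse acc = (pvTailSeg [] l).filter PySem.Chars.isdigit ++ acc := by
  induction l using List.reverseRecOn generalizing acc with
  | nil => simp [pvScanB, pvTailSeg]
  | append_singleton xs c ih =>
    rw [List.reverse_append, List.reverse_singleton, List.singleton_append]
    by_cases hc : c = '-'
    · simp [pvScanB, hc, pvTailSeg_concat]
    · rw [pvScanB, if_neg hc, ih, pvTailSeg_concat, if_neg hc, List.filter_append]
      by_cases hd : PySem.Chars.isdigit c <;> simp [hd]

theorem pvDigits_eq (s : List Char) :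
    (if PySem.Chars.isIn ['-'] s then
        PySem.Chars.strip ((PySem.Chars.splitOn s ['-']).getLastD [])
      else s).filter PySem.Chars.isdigit = pvScanB s.reverse [] := by
  rw [pvScanB_eq]
  by_cases h : PySem.Chars.isIn ['-'] s
  · rw [if_pos h, pvSplitOn_last, pvFilter_strip, List.append_nil]
  · have hm : '-' ∉ s := by
      have := PySem.Chars.isIn_eq_false_iff (sub := ['-']) (s := s)
      rw [List.singleton_infix_iff] at this
      exact this.mp (by simpa using h)
    rw [if_neg h, pvTailSeg_no_dash _ _ hm, List.nil_append, List.append_nil]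

-- ===== VERDICT (by name: the statement is the Claim_ definition above) =====
theorem parse_numero_act_py_spec : Claim_equal_parse_numero_act_py := by
  intro value _
  unfold Spec_parse_numero_act_py parse_numero_act_py parse_numero_act_py_alt
  cases value with
  | none => rfl
  | some v =>
    simp only []
    rw [pvDigits_eq]
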